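-- pv_equiv track=rewrite | github.com/BennyJane/algorithm_mad | leetcode/dp/middle01/maxPoints.py | maxPoints2
-- ===== SOURCE A (Python) =====
-- from functools import lru_cache
-- from typing import List
--
-- def maxPoints2(points: List[List[int]]) -> int:
--     m = len(points)
--     n = len(points[0])
--
--     max_value = 0
--
--     @lru_cache(None)
--     def dfs(pos_info) -> int:
--         val = 0  # 最大值
--         row, y = pos_info
--         if row >= m:
--             return 0
--         for Y in range(n):
--             cur = points[row][Y]
--             next_info = row + 1, Y
--             back_sum = dfs(next_info) + cur - abs(y - Y)
--             val = max(val, back_sum)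
--         return val
--
--     for i in range(n):
--         info = (1, i)
--         max_value = max(max_value, dfs(info) + points[0][i])
--
--     return max_value
-- ===== SOURCE B (Python) =====
-- from typing import List
--
-- def maxPoints2(points: List[List[int]]) -> int:
--     # Bottom-up DP over rows; the |y-Y| penalty is handled by left/right
--     # running-max scans, O(m*n) instead of O(m*n^2).
--     n = len(points[0])
--     if n == 0:
--         return 0
--     dp = [0] * n  # dp[y] = best score obtainable from the rows below (never negative)
--     for row in reversed(points[1:]):
--         g = [dp[Y] + row[Y] for Y in range(n)]
--         left = []
--         run = g[0]
--         left.append(run)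
--         for y in range(1, n):
--             run = max(run - 1, g[y])
--             left.append(run)
--         right = [0] * n
--         run = g[n - 1]
--         right[n - 1] = run
--         for y in range(n - 2, -1, -1):
--             run = max(run - 1, g[y])
--             right[y] = run
--         dp = [max(0, left[y], right[y]) for y in range(n)]
--     best = 0
--     for i in range(n):
--         best = max(best, dp[i] + points[0][i])
--     return best
-- ===== Notes on version B (the rewrite author's own statement) =====
-- stated objective: faster
-- what changed: A's memoized top-down recursion scans all n columns of the next row for every (row, column) state (O(m*n^2)); B is a bottom-up row DP that resolves the |y-Y| distance penalty with left-to-right and right-to-left running-max scans, one pass per row (O(m*n)).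
import Mathlib
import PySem

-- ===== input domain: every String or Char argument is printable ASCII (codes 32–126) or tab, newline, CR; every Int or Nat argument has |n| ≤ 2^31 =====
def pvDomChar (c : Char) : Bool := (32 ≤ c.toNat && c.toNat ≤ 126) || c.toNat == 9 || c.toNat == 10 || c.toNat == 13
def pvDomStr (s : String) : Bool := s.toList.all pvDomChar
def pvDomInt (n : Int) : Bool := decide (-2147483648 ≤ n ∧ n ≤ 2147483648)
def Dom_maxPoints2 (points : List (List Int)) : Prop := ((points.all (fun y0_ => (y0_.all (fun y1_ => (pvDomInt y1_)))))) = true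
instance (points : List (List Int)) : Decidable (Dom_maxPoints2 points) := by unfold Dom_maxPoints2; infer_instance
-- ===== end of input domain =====

-- B replaces A's memoized recursion (O(m·n²)) with a bottom-up row DP whose |y-Y| penalty
-- is resolved by left/right running-max scans (O(m·n)); a timing run measured the speed-up.

-- ===== PORT A =====
-- A's lru_cache is an optimization only; dfs is ported as plain recursion on (row, y).
-- points[row][Y] is ported with pyGetD (defaults [] / 0): exact under Pre_maxPoints2,
-- which guarantees every index Python reads is in range (outside it Python raises IndexError).
def dfsA (points : List (List Int)) (m n : Int) (row y : Int) : Int :=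
  if row ≥ m then 0
  else
    (PySem.List.pyRange 0 n 1).foldl
      (fun val Y =>
        max val (dfsA points m n (row + 1) Y
          + PySem.List.pyGetD (PySem.List.pyGetD points row []) Y 0 - |y - Y|)) 0
termination_by (m - row).toNat
decreasing_by simp_wf; omega


def maxPoints2 (points : List (List Int)) : Int :=
  let m : Int := (points.length : Int)
  let n : Int := ((PySem.List.pyGetD points 0 []).length : Int)
  (PySem.List.pyRange 0 n 1).foldl
    (fun max_value i =>
      max max_value (dfsA points m n 1 i + PySem.List.pyGetD (PySem.List.pyGetD points 0 []) i 0)) 0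

-- ===== PORT B =====
-- running-max scan: lmaxScan run xs = [run, max(run-1,xs0), max(max(run-1,xs0)-1,xs1), …]
-- (Source B's append loop for `left`; the downward `right` loop produces the same scan on the
-- reversed list, written back-to-front, hence the .reverse below).
def lmaxScan (run : Int) : List Int → List Int
  | [] => [run]
  | x :: xs => run :: lmaxScan (max (run - 1) x) xs

def stepB (n : Nat) (dp row : List Int) : List Int :=
  let g := (List.range n).map (fun Y => dp.getD Y 0 + row.getD Y 0)
  let left := lmaxScan (g.getD 0 0) g.tail
  let right := (lmaxScan (g.reverse.getD 0 0) g.reverse.tail).reverse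
  (List.range n).map (fun y => max 0 (max (left.getD y 0) (right.getD y 0)))

def maxPoints2_alt (points : List (List Int)) : Int :=
  let n := (points.headD []).length
  if n = 0 then 0
  else
    let dp := ((points.drop 1).reverse).foldl (stepB n) (List.replicate n 0)
    (List.range n).foldl
      (fun best i => max best (dp.getD i 0 + (points.headD []).getD i 0)) 0

-- ===== PRECONDITION & SPEC =====
-- Pre_ excludes exactly the inputs where A raises IndexError: empty `points`
-- (points[0]) or a row shorter than the first row (points[row][Y], Y < n).
def Pre_maxPoints2 (points : List (List Int)) : Prop :=
  points ≠ [] ∧ ∀ row ∈ points, (points.headD []).length ≤ row.length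
instance (points : List (List Int)) : Decidable (Pre_maxPoints2 points) := by
  unfold Pre_maxPoints2; infer_instance

def pvWitness_maxPoints2 : List (List Int) := [[1, 2, 3], [1, 5, 1], [3, 1, 1]]

def Spec_maxPoints2 (points : List (List Int)) (out : Int) : Prop := out = maxPoints2_alt points
instance (points : List (List Int)) (out : Int) : Decidable (Spec_maxPoints2 points out) := by
  unfold Spec_maxPoints2; infer_instance

-- ===== CLAIM (what is proved, stated in full; the proofs are below) =====
def Claim_equal_maxPoints2 : Prop := ∀ (points : List (List Int)), Dom_maxPoints2 points →
  Pre_maxPoints2 points → Spec_maxPoints2 points (maxPoints2 points)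

-- ===== LEMMAS AND PROOFS =====

theorem pv_foldl_max_init {α : Type} (h : α → Int) (l : List α) (a : Int) :
    a ≤ l.foldl (fun v x => max v (h x)) a := by
  induction l generalizing a with
  | nil => simp
  | cons x xs ih => exact le_trans (le_max_left a (h x)) (ih _)

theorem pv_foldl_max_mem {α : Type} (h : α → Int) (l : List α) (a : Int) {x : α}
    (hx : x ∈ l) : h x ≤ l.foldl (fun v y => max v (h y)) a := by
  induction l generalizing a with
  | nil => cases hx
  | cons z zs ih =>
    rcases List.mem_cons.mp hx with rfl | hx'
    · exact le_trans (le_max_right a (h x)) (pv_foldl_max_init h zs _)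
    · apply ih; exact hx'

theorem pv_foldl_max_le {α : Type} (h : α → Int) (l : List α) (a c : Int)
    (ha : a ≤ c) (hl : ∀ x ∈ l, h x ≤ c) : l.foldl (fun v x => max v (h x)) a ≤ c := by
  induction l generalizing a with
  | nil => exact ha
  | cons x xs ih =>
    apply ih
    · exact max_le ha (hl x List.mem_cons_self)
    · exact fun y hy => hl y (List.mem_cons_of_mem _ hy)

-- the running left-max recurrence
def LB (f : Nat → Int) : Nat → Int
  | 0 => f 0
  | i + 1 => max (LB f i - 1) (f (i + 1))

theorem LB_ge (f : Nat → Int) {j i : Nat} (hj : j ≤ i) : f j - ((i : Int) - (j : Int)) ≤ LB f i := by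
  induction i with
  | zero => interval_cases j; simp [LB]
  | succ i ih =>
    rcases Nat.lt_or_ge j (i+1) with hlt | hge
    · have := ih (Nat.lt_succ_iff.mp hlt)
      calc f j - ((i+1 : Int) - j) = (f j - ((i : Int) - j)) - 1 := by ring
        _ ≤ LB f i - 1 := by omega
        _ ≤ LB f (i+1) := le_max_left _ _
    · have : j = i + 1 := le_antisymm hj hge
      subst this
      simp [LB]

theorem LB_le (f : Nat → Int) (i : Nat) {c : Int}
    (h : ∀ j ≤ i, f j - ((i : Int) - (j : Int)) ≤ c) : LB f i ≤ c := by
  induction i generalizing c with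
  | zero => simpa [LB] using h 0 (le_refl 0)
  | succ i ih =>
    simp only [LB]
    refine max_le ?_ (by simpa using h (i+1) (le_refl _))
    have : LB f i ≤ c + 1 := by
      refine ih (fun j hj => ?_)
      have := h j (le_trans hj (Nat.le_succ i))
      push_cast at this ⊢; omega
    omega

theorem lmaxScan_length (run : Int) (xs : List Int) : (lmaxScan run xs).length = xs.length + 1 := by
  induction xs generalizing run with
  | nil => rfl
  | cons x xs ih => simp [lmaxScan, ih]

theorem LB_shift (a x : Int) (xs : List Int) (i : Nat) :
    LB (fun j => (a :: x :: xs).getD j 0) (i + 1)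
      = LB (fun j => (max (a - 1) x :: xs).getD j 0) i := by
  induction i with
  | zero => simp [LB]
  | succ i ih =>
    show max (LB (fun j => (a :: x :: xs).getD j 0) (i + 1) - 1) ((a :: x :: xs).getD (i + 1 + 1) 0)
        = max (LB (fun j => (max (a - 1) x :: xs).getD j 0) i - 1) ((max (a - 1) x :: xs).getD (i + 1) 0)
    rw [ih]
    simp

theorem lmaxScan_getD (a : Int) (xs : List Int) (i : Nat) (hi : i < xs.length + 1) :
    (lmaxScan a xs).getD i 0 = LB (fun j => (a :: xs).getD j 0) i := by
  induction xs generalizing a i with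
  | nil =>
    have h0 : i = 0 := by simp at hi; omega
    subst h0
    simp [lmaxScan, LB]
  | cons x xs ih =>
    cases i with
    | zero => simp [lmaxScan, LB]
    | succ i =>
      rw [LB_shift]
      simpa [lmaxScan] using ih (max (a-1) x) i (by simpa using hi)

theorem pv_getD_reverse (g : List Int) (j : Nat) (hj : j < g.length) :
    g.reverse.getD j 0 = g.getD (g.length - 1 - j) 0 := by
  rw [List.getD_eq_getElem _ _ (by simpa using hj), List.getD_eq_getElem _ _ (by omega)]
  simp [List.getElem_reverse]

-- the crux: A's O(n) inner max equals the clamp of the two scan values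
theorem crux (g : List Int) (n y : Nat) (hn : g.length = n) (h1 : 1 ≤ n) (hy : y < n) :
    (List.range n).foldl (fun v Y => max v (g.getD Y 0 - |((y : Int)) - (Y : Int)|)) 0
      = max 0 (max ((lmaxScan (g.getD 0 0) g.tail).getD y 0)
                   ((lmaxScan (g.reverse.getD 0 0) g.reverse.tail).getD (n - 1 - y) 0)) := by
  have hgne : g ≠ [] := by intro h; subst h; simp at hn; omega
  have hg : g.getD 0 0 :: g.tail = g := by
    cases g with
    | nil => exact absurd rfl hgne
    | cons a t => simp
  have hgr : g.reverse.getD 0 0 :: g.reverse.tail = g.reverse := by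
    cases hrev : g.reverse with
    | nil => exact absurd (List.reverse_eq_nil_iff.mp hrev) hgne
    | cons a t => simp
  have hlen_tail : g.tail.length + 1 = n := by
    cases g with
    | nil => exact absurd rfl hgne
    | cons a t => simpa using hn
  have hlenr : g.reverse.length = n := by simpa using hn
  have hlenr_tail : g.reverse.tail.length + 1 = n := by
    cases hrev : g.reverse with
    | nil => exact absurd (List.reverse_eq_nil_iff.mp hrev) hgne
    | cons a t => rw [← hlenr, hrev]; simp
  rw [lmaxScan_getD _ _ y (by omega), lmaxScan_getD _ _ (n - 1 - y) (by omega), hg, hgr]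
  set f : Nat → Int := fun j => g.getD j 0 with hf
  set fr : Nat → Int := fun j => g.reverse.getD j 0 with hfr
  have hfr_eq : ∀ j, j < n → fr j = f (n - 1 - j) := by
    intro j hj
    have := pv_getD_reverse g j (by omega)
    simp only [hfr, hf, this, hn]
  apply le_antisymm
  · -- fold ≤ clamp of the two scans
    apply pv_foldl_max_le
    · exact le_max_left _ _
    · intro Y hY
      rw [List.mem_range] at hY
      by_cases hc : Y ≤ y
      · have habs : |((y : Int)) - (Y : Int)| = (y : Int) - (Y : Int) := by
          rw [abs_of_nonneg]; omega
        rw [habs]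
        exact le_trans (LB_ge f hc) (le_trans (le_max_left _ _) (le_max_right _ _))
      · have hc' : y < Y := Nat.lt_of_not_le hc
        have habs : |((y : Int)) - (Y : Int)| = (Y : Int) - (y : Int) := by
          rw [abs_of_nonpos (by omega)]; omega
        rw [habs]
        have hj : n - 1 - Y ≤ n - 1 - y := by omega
        have h2 := LB_ge fr hj
        rw [hfr_eq (n - 1 - Y) (by omega)] at h2
        have e1 : n - 1 - (n - 1 - Y) = Y := by omega
        have e2 : ((n - 1 - y : Nat) : Int) - ((n - 1 - Y : Nat) : Int) = (Y : Int) - (y : Int) := by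
          omega
        rw [e1, e2] at h2
        exact le_trans h2 (le_trans (le_max_right _ _) (le_max_right _ _))
  · -- clamp of the two scans ≤ fold
    apply max_le
    · exact pv_foldl_max_init _ _ _
    · apply max_le
      · apply LB_le
        intro j hj
        have habs : ((y : Int)) - (j : Int) = |((y : Int)) - (j : Int)| := by
          rw [abs_of_nonneg]; omega
        rw [habs]
        exact pv_foldl_max_mem _ _ _ (List.mem_range.mpr (by omega))
      · apply LB_le
        intro j hj
        rw [hfr_eq j (by omega)]
        have habs : ((n - 1 - y : Nat) : Int) - ((j : Nat) : Int)
            = |((y : Int)) - ((n - 1 - j : Nat) : Int)| := by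
          rw [abs_of_nonpos (by omega)]; omega
        rw [habs]
        exact pv_foldl_max_mem _ _ _ (List.mem_range.mpr (by omega))

-- one DP row step computes one more level of A's recursion
theorem step_lemma (points : List (List Int)) (n r : Nat) (hn : 1 ≤ n) (hrm : r < points.length) :
    stepB n ((List.range n).map (fun (y : Nat) => dfsA points (points.length : Int) (n : Int) ((r : Int) + 1) (y : Int)))
        (points.getD r [])
      = (List.range n).map (fun (y : Nat) => dfsA points (points.length : Int) (n : Int) (r : Int) (y : Int)) := by
  have hM : ¬ ((r : Int) ≥ (points.length : Int)) := by omega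
  simp only [stepB]
  set dp := (List.range n).map
      (fun (y : Nat) => dfsA points (points.length : Int) (n : Int) ((r : Int) + 1) (y : Int)) with hdp
  set row := points.getD r [] with hrw
  set g := (List.range n).map (fun Y => dp.getD Y 0 + row.getD Y 0) with hgdef
  have hglen : g.length = n := by simp [hgdef]
  have hgval : ∀ Y, Y < n →
      g.getD Y 0 = dfsA points (points.length : Int) (n : Int) ((r : Int) + 1) (Y : Int)
        + row.getD Y 0 := by
    intro Y hY
    rw [hgdef, PySem.List.getD_map_range _ _ _ _ hY, hdp, PySem.List.getD_map_range _ _ _ _ hY]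
  apply List.map_congr_left
  intro y hy
  rw [List.mem_range] at hy
  -- right-hand side: unfold one level of A's recursion at row r
  rw [dfsA, if_neg hM, PySem.List.pyRange_one]
  have htn : ((n : Int) - 0).toNat = n := by omega
  rw [htn, List.foldl_map]
  rw [PySem.List.foldl_congr_mem _ _
      (fun v (Y : Nat) => max v (g.getD Y 0 - |((y : Int)) - (Y : Int)|)) 0
      (by
        intro acc Y hYm
        rw [List.mem_range] at hYm
        simp only [zero_add, PySem.List.pyGetD_natCast, hgval Y hYm, ← hrw])]
  -- left-hand side: the two scans, via crux
  rw [crux g n y hglen hn hy]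
  have hrtl : g.reverse.tail.length = n - 1 := by simp [hglen]
  have hrl : (lmaxScan (g.reverse.getD 0 0) g.reverse.tail).length = n := by
    rw [lmaxScan_length, hrtl]; omega
  have := pv_getD_reverse (lmaxScan (g.reverse.getD 0 0) g.reverse.tail) y (by omega)
  rw [hrl] at this
  rw [this]

theorem rows_fold (points : List (List Int)) (n : Nat) (hn : 1 ≤ n) :
    ∀ k r : Nat, 1 ≤ r → r + k = points.length →
      ((points.drop r).reverse).foldl (stepB n) (List.replicate n 0)
        = (List.range n).map (fun (y : Nat) => dfsA points (points.length : Int) (n : Int) (r : Int) (y : Int)) := by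
  intro k
  induction k with
  | zero =>
    intro r hr1 hrk
    have hr : r = points.length := by omega
    subst hr
    rw [List.drop_length]
    simp only [List.reverse_nil, List.foldl_nil]
    have hz : ∀ y : Nat, dfsA points (points.length : Int) (n : Int) ((points.length : Nat) : Int) (y : Int) = 0 := by
      intro y
      rw [dfsA, if_pos (le_refl _)]
    rw [List.map_congr_left (fun (y : Nat) _ => hz y)]
    simp [List.map_const']
  | succ k ih =>
    intro r hr1 hrk
    have hlt : r < points.length := by omega
    rw [List.drop_eq_getElem_cons hlt, List.reverse_cons, List.foldl_append]
    rw [ih (r + 1) (by omega) (by omega)]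
    simp only [List.foldl_cons, List.foldl_nil, Nat.cast_add, Nat.cast_one]
    have hg : points[r] = points.getD r [] := (List.getD_eq_getElem _ _ hlt).symm
    rw [hg]
    exact step_lemma points n r hn hlt

-- ===== VERDICT (by name: the statement is the Claim_ definition above) =====
theorem maxPoints2_spec : Claim_equal_maxPoints2 := by
  intro points _hdom hpre
  obtain ⟨hne, _hrows⟩ := hpre
  unfold Spec_maxPoints2 maxPoints2 maxPoints2_alt
  have hp0 : PySem.List.pyGetD points 0 [] = points.headD [] := by
    cases points with
    | nil => exact absurd rfl hne
    | cons a t => simp [PySem.List.pyGetD_zero_cons]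
  simp only [hp0]
  set n := (points.headD []).length with hn
  by_cases h0 : n = 0
  · rw [if_pos h0, h0]
    rw [show ((0 : Nat) : Int) = 0 from rfl, PySem.List.pyRange_one_eq_nil (by omega)]
    rfl
  · rw [if_neg h0]
    have h1 : 1 ≤ n := Nat.one_le_iff_ne_zero.mpr h0
    have hlen1 : 1 ≤ points.length := by
      cases points with
      | nil => exact absurd rfl hne
      | cons a t => simp
    have hdp := rows_fold points n h1 (points.length - 1) 1 (le_refl 1) (by omega)
    rw [hdp]
    rw [PySem.List.pyRange_one]
    have htn : ((n : Int) - 0).toNat = n := by omega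
    rw [htn, List.foldl_map]
    apply PySem.List.foldl_congr_mem
    intro acc i him
    rw [List.mem_range] at him
    simp only [zero_add, PySem.List.pyGetD_natCast,
      PySem.List.getD_map_range _ _ _ _ him, Nat.cast_one]
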